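-- pv_equiv track=rewrite | github.com/twinelabs/enginev2 | enginev1/apps/match/entwine/matching/clustering/methods.py | all_groups
-- ===== SOURCE A (Python) =====
-- import itertools
--
-- def all_groups(remaining, k):
--     # If only k or fewer remaining, just return those indices as a group
--     if len(remaining) <= k:
--         return [tuple(remaining)]
--     else:
--         groups_size_k = itertools.combinations(remaining, k)
--         clusters = []
--         for group in groups_size_k:
--             new_remaining = [num for num in remaining if num not in group]
--             new_clusters = all_groups(new_remaining, k)
--             clusters += [group + new_cluster for new_cluster in new_clusters]
--         return clusters
-- ===== SOURCE B (Python) =====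
-- import itertools
--
-- def all_groups(remaining, k):
--     # Iterative DFS with an explicit stack of (prefix, remaining) states,
--     # replacing A's recursion; children are pushed in reversed order so the
--     # stack yields the recursion's left-to-right pre-order.
--     results = []
--     stack = [((), list(remaining))]
--     while stack:
--         prefix, rem = stack.pop()
--         if len(rem) <= k:
--             results.append(prefix + tuple(rem))
--         else:
--             for group in reversed(list(itertools.combinations(rem, k))):
--                 stack.append((prefix + group, [x for x in rem if x not in group]))
--     return results
-- ===== Notes on version B (the rewrite author's own statement) =====
-- stated objective: alternative
-- what changed: Replaces A's recursion with an iterative DFS over an explicit stack of (prefix, remaining) states, pushing children in reversed combination order so the same pre-order result list is produced.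
import Mathlib
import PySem

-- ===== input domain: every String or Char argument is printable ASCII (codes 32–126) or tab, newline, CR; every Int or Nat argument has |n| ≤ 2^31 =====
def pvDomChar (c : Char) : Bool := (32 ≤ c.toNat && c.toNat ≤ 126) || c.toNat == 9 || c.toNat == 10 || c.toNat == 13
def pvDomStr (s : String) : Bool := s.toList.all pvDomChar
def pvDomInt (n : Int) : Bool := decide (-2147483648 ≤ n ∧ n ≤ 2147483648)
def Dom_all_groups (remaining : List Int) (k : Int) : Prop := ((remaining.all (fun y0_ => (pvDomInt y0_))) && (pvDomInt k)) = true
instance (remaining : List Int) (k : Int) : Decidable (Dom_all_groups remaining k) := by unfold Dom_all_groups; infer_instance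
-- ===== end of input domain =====

-- B replaces A's recursion by an iterative DFS with an explicit stack of (prefix, remaining)
-- states (objective: alternative decomposition, same output order and multiplicity).

-- ===== PORT A =====
-- itertools.combinations over a list, in itertools' output order
def pvCombos : Nat → List Int → List (List Int)
  | 0, _ => [[]]
  | _+1, [] => []
  | n+1, x :: xs => (pvCombos n xs).map (fun g => x :: g) ++ pvCombos (n+1) xs

-- fueled transliteration of A's recursion (fuel is only a totality guard;
-- remaining.length + 1 suffices on Pre_)
def pvAgo (k : Int) : Nat → List Int → List (List Int)
  | 0, _ => []
  | f+1, remaining =>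
    if (remaining.length : Int) ≤ k then [remaining]
    else
      (pvCombos k.toNat remaining).foldl (fun clusters group =>
        clusters ++ (pvAgo k f (remaining.filter (fun num => !group.contains num))).map
          (fun c => group ++ c)) []

def all_groups (remaining : List Int) (k : Int) : List (List Int) :=
  pvAgo k (remaining.length + 1) remaining

-- ===== PORT B =====
-- fuel bound for the stack loop: number of states ever popped when expanding a
-- state with this remaining list (a totality guard only; mirrors the tree size)
def pvCost (k : Int) : Nat → List Int → Nat
  | 0, _ => 1
  | f+1, r =>
    if (r.length : Int) ≤ k then 1
    else 1 + ((pvCombos k.toNat r).map (fun g => pvCost k f (r.filter (fun x => !g.contains x)))).sum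

-- Source B's while-loop over the explicit stack: head of the list = top of the stack
-- (Python pushes the children reversed, so the first combination is on top;
--  prepending the children in combination order is the same stack)
def pvBgo (k : Int) : Nat → List (List Int × List Int) → List (List Int) → List (List Int)
  | 0, _, res => res
  | _+1, [], res => res
  | f+1, (p, r) :: rest, res =>
    if (r.length : Int) ≤ k then pvBgo k f rest (res ++ [p ++ r])
    else pvBgo k f ((pvCombos k.toNat r).map
        (fun g => (p ++ g, r.filter (fun x => !g.contains x))) ++ rest) res

def all_groups_alt (remaining : List Int) (k : Int) : List (List Int) :=
  pvBgo k (pvCost k (remaining.length + 1) remaining) [([], remaining)] []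

-- ===== PRECONDITION & SPEC =====
-- Pre_ excludes only inputs where A raises or diverges: k < 0 with len(remaining) > k
-- raises ValueError in itertools.combinations, and k = 0 with remaining nonempty
-- recurses forever on an unchanged list (RecursionError).
def Pre_all_groups (remaining : List Int) (k : Int) : Prop :=
  1 ≤ k ∨ (remaining = [] ∧ 0 ≤ k)
instance (remaining : List Int) (k : Int) : Decidable (Pre_all_groups remaining k) := by
  unfold Pre_all_groups; infer_instance
def pvWitness_all_groups : List Int × Int := ([1, 2, 3], 1)

def Spec_all_groups (remaining : List Int) (k : Int) (out : List (List Int)) : Prop := out = all_groups_alt remaining k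
instance (remaining : List Int) (k : Int) (out : List (List Int)) : Decidable (Spec_all_groups remaining k out) := by unfold Spec_all_groups; infer_instance

-- ===== CLAIM (what is proved, stated in full; the proofs are below) =====
def Claim_equal_all_groups : Prop := ∀ (remaining : List Int) (k : Int), Dom_all_groups remaining k → Pre_all_groups remaining k → Spec_all_groups remaining k (all_groups remaining k)

-- ===== LEMMAS AND PROOFS =====

theorem pvCombos_mem {n : Nat} {xs g : List Int} (h : g ∈ pvCombos n xs) :
    g.Sublist xs ∧ g.length = n := by
  induction xs generalizing n g with
  | nil =>
    cases n with
    | zero => simp [pvCombos] at h; simp [h]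
    | succ n => simp [pvCombos] at h
  | cons x xs ih =>
    cases n with
    | zero => simp [pvCombos] at h; simp [h]
    | succ n =>
      simp only [pvCombos, List.mem_append, List.mem_map] at h
      rcases h with ⟨g', hg', rfl⟩ | h
      · obtain ⟨hs, hl⟩ := ih hg'
        exact ⟨List.Sublist.cons₂ _ hs, by simp [hl]⟩
      · obtain ⟨hs, hl⟩ := ih h
        exact ⟨hs.cons _, hl⟩

theorem pvFilter_shrink {k : Int} {r g : List Int} (hk : 1 ≤ k)
    (hg : g ∈ pvCombos k.toNat r) :
    (r.filter (fun x => !g.contains x)).length < r.length := by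
  obtain ⟨hs, hl⟩ := pvCombos_mem hg
  have hgn : g ≠ [] := by
    intro h; subst h
    simp at hl
    omega
  obtain ⟨a, g', rfl⟩ := List.exists_cons_of_ne_nil hgn
  have har : a ∈ r := hs.subset (by simp)
  rw [List.length_filter_lt_length_iff_exists]
  exact ⟨a, har, by simp⟩

theorem pvFlatMap_congr {α β : Type} {l : List α} {f g : α → List β}
    (h : ∀ x ∈ l, f x = g x) : l.flatMap f = l.flatMap g := by
  induction l with
  | nil => rfl
  | cons x xs ih =>
    simp only [List.flatMap_cons, h x (by simp), ih fun y hy => h y (by simp [hy])]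

theorem pvAgo_else {k : Int} {f : Nat} {r : List Int} (h : ¬ (r.length : Int) ≤ k) :
    pvAgo k (f+1) r =
      (pvCombos k.toNat r).flatMap
        (fun g => (pvAgo k f (r.filter (fun x => !g.contains x))).map (fun c => g ++ c)) := by
  simp only [pvAgo, if_neg h]
  simpa using PySem.List.foldl_append_eq_flatMap
    (fun g => (pvAgo k f (r.filter (fun x => !g.contains x))).map (fun c => g ++ c))
    (pvCombos k.toNat r) []

theorem pvAgo_fuel {k : Int} (hk : 1 ≤ k) :
    ∀ n : Nat, ∀ r : List Int, r.length ≤ n →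
      ∀ f f' : Nat, r.length < f → r.length < f' → pvAgo k f r = pvAgo k f' r := by
  intro n
  induction n with
  | zero =>
    intro r hr f f' hf hf'
    have : r = [] := List.length_eq_zero_iff.mp (by omega)
    subst this
    obtain ⟨f, rfl⟩ := Nat.exists_eq_succ_of_ne_zero (by omega : f ≠ 0)
    obtain ⟨f', rfl⟩ := Nat.exists_eq_succ_of_ne_zero (by omega : f' ≠ 0)
    simp [pvAgo, (by omega : (0 : Int) ≤ k)]
  | succ n ih =>
    intro r hr f f' hf hf'
    obtain ⟨f, rfl⟩ := Nat.exists_eq_succ_of_ne_zero (by omega : f ≠ 0)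
    obtain ⟨f', rfl⟩ := Nat.exists_eq_succ_of_ne_zero (by omega : f' ≠ 0)
    by_cases h : (r.length : Int) ≤ k
    · simp [pvAgo, h]
    · rw [pvAgo_else h, pvAgo_else h]
      refine pvFlatMap_congr fun g hg => ?_
      have hlt := pvFilter_shrink hk hg
      rw [ih _ (by omega) f ((r.filter (fun x => !g.contains x)).length + 1)
            (by omega) (by omega),
          ih _ (by omega) f' ((r.filter (fun x => !g.contains x)).length + 1)
            (by omega) (by omega)]

theorem pvCost_fuel {k : Int} (hk : 1 ≤ k) :
    ∀ n : Nat, ∀ r : List Int, r.length ≤ n →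
      ∀ f f' : Nat, r.length < f → r.length < f' → pvCost k f r = pvCost k f' r := by
  intro n
  induction n with
  | zero =>
    intro r hr f f' hf hf'
    have : r = [] := List.length_eq_zero_iff.mp (by omega)
    subst this
    obtain ⟨f, rfl⟩ := Nat.exists_eq_succ_of_ne_zero (by omega : f ≠ 0)
    obtain ⟨f', rfl⟩ := Nat.exists_eq_succ_of_ne_zero (by omega : f' ≠ 0)
    simp [pvCost, (by omega : (0 : Int) ≤ k)]
  | succ n ih =>
    intro r hr f f' hf hf'
    obtain ⟨f, rfl⟩ := Nat.exists_eq_succ_of_ne_zero (by omega : f ≠ 0)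
    obtain ⟨f', rfl⟩ := Nat.exists_eq_succ_of_ne_zero (by omega : f' ≠ 0)
    by_cases h : (r.length : Int) ≤ k
    · simp [pvCost, h]
    · simp only [pvCost, if_neg h]
      congr 1
      congr 1
      refine List.map_congr_left fun g hg => ?_
      have hlt := pvFilter_shrink hk hg
      rw [ih _ (by omega) f ((r.filter (fun x => !g.contains x)).length + 1)
            (by omega) (by omega),
          ih _ (by omega) f' ((r.filter (fun x => !g.contains x)).length + 1)
            (by omega) (by omega)]

theorem pvCost_pos {k : Int} {f : Nat} {r : List Int} : 1 ≤ pvCost k f r := by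
  cases f with
  | zero => simp [pvCost]
  | succ f =>
    simp only [pvCost]
    split <;> omega

-- total fuel stored in a stack
def pvStCost (k : Int) (st : List (List Int × List Int)) : Nat :=
  (st.map (fun s => pvCost k (s.2.length + 1) s.2)).sum

theorem pvBgo_main {k : Int} (hk : 1 ≤ k) :
    ∀ f : Nat, ∀ st : List (List Int × List Int), ∀ res : List (List Int),
      pvStCost k st ≤ f →
      pvBgo k f st res =
        res ++ st.flatMap (fun s => (all_groups s.2 k).map (fun c => s.1 ++ c)) := by
  intro f
  induction f with
  | zero =>
    intro st res h
    cases st with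
    | nil => simp [pvBgo]
    | cons s rest =>
      exfalso
      have : 1 ≤ pvStCost k (s :: rest) := by
        simp only [pvStCost, List.map_cons, List.sum_cons]
        have := @pvCost_pos k (s.2.length + 1) s.2
        omega
      omega
  | succ f ih =>
    intro st res h
    cases st with
    | nil => simp [pvBgo]
    | cons s rest =>
      obtain ⟨p, r⟩ := s
      have hcost : pvCost k (r.length + 1) r + pvStCost k rest ≤ f + 1 := by
        simpa [pvStCost] using h
      by_cases hle : (r.length : Int) ≤ k
      · have hc1 : pvCost k (r.length + 1) r = 1 := by simp [pvCost, hle]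
        have hA : all_groups r k = [r] := by simp [all_groups, pvAgo, hle]
        simp only [pvBgo, if_pos hle]
        rw [ih rest (res ++ [p ++ r]) (by omega)]
        simp [hA]
      · -- expansion step
        have hc : pvCost k (r.length + 1) r
            = 1 + ((pvCombos k.toNat r).map
                (fun g => pvCost k r.length (r.filter (fun x => !g.contains x)))).sum := by
          simp [pvCost, hle]
        have hmap : ((pvCombos k.toNat r).map
              (fun g => pvCost k r.length (r.filter (fun x => !g.contains x))))
            = ((pvCombos k.toNat r).map
              (fun g => pvCost k ((r.filter (fun x => !g.contains x)).length + 1)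
                  (r.filter (fun x => !g.contains x)))) := by
          refine List.map_congr_left fun g hg => ?_
          have hlt := pvFilter_shrink hk hg
          exact pvCost_fuel hk r.length _ (by omega) _ _ (by omega) (by omega)
        set ch := (pvCombos k.toNat r).map
            (fun g => (p ++ g, r.filter (fun x => !g.contains x))) with hch
        have hchcost : pvStCost k ch
            = ((pvCombos k.toNat r).map
              (fun g => pvCost k ((r.filter (fun x => !g.contains x)).length + 1)
                  (r.filter (fun x => !g.contains x)))).sum := by
          simp [pvStCost, hch, List.map_map, Function.comp_def]
        have hstch : pvStCost k (ch ++ rest) ≤ f := by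
          have : pvStCost k (ch ++ rest) = pvStCost k ch + pvStCost k rest := by
            simp [pvStCost]
          rw [this, hchcost, ← hmap]
          omega
        simp only [pvBgo, if_neg hle]
        rw [ih (ch ++ rest) res hstch, List.flatMap_append]
        have hA : all_groups r k
            = (pvCombos k.toNat r).flatMap
                (fun g => (all_groups (r.filter (fun x => !g.contains x)) k).map
                  (fun c => g ++ c)) := by
          rw [all_groups, pvAgo_else hle]
          refine pvFlatMap_congr fun g hg => ?_
          have hlt := pvFilter_shrink hk hg
          rw [pvAgo_fuel hk r.length _ (by omega) r.length
                ((r.filter (fun x => !g.contains x)).length + 1) (by omega) (by omega)]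
          rfl
        have hchflat : ch.flatMap (fun s => (all_groups s.2 k).map (fun c => s.1 ++ c))
            = (all_groups r k).map (fun c => p ++ c) := by
          rw [hA, hch, List.flatMap_map, List.map_flatMap]
          refine pvFlatMap_congr fun g hg => ?_
          simp [List.map_map, Function.comp, List.append_assoc]
        rw [hchflat, List.flatMap_cons]

-- ===== VERDICT (by name: the statement is the Claim_ definition above) =====
theorem all_groups_spec : Claim_equal_all_groups := by
  intro remaining k _ hpre
  unfold Spec_all_groups
  rcases hpre with hk | ⟨hnil, hk0⟩
  · rw [all_groups_alt,
        pvBgo_main hk (pvCost k (remaining.length + 1) remaining) [([], remaining)] []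
          (by simp [pvStCost])]
    simp
  · subst hnil
    have h0 : ((0 : Int) ≤ k) := hk0
    simp [all_groups, all_groups_alt, pvAgo, pvCost, pvBgo, h0]
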